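-- pv_equiv track=rewrite | github.com/MafasaBytes/Lightweight-CSLR | apps/edu_dashboard.py | greedy_segments_from_ids
-- ===== SOURCE A (Python) =====
-- from typing import List, Tuple
--
-- def greedy_segments_from_ids(ids: List[int], idx2word: dict, blank_id: int = 0) -> List[Tuple[str, int, int]]:
--     segs = []
--     cur = None
--     cur_start = 0
--     for t, tok in enumerate(ids + [None]):
--         if cur is None:
--             cur = tok
--             cur_start = t
--             continue
--         if tok != cur:
--             if cur is not None and int(cur) != int(blank_id):
--                 segs.append((idx2word.get(int(cur), "<unk>"), int(cur_start), int(t)))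
--             cur = tok
--             cur_start = t
--     return segs
-- ===== SOURCE B (Python) =====
-- from typing import List, Tuple
--
-- def greedy_segments_from_ids(ids: List[int], idx2word: dict, blank_id: int = 0) -> List[Tuple[str, int, int]]:
--     # Boundary method: first compute every change point, then pair adjacent
--     # boundaries into intervals and keep the non-blank ones.
--     if not ids:
--         return []
--     n = len(ids)
--     cuts = [0] + [i for i in range(1, n) if ids[i] != ids[i - 1]] + [n]
--     return [(idx2word.get(int(ids[s]), "<unk>"), int(s), int(e))
--             for s, e in zip(cuts, cuts[1:])
--             if int(ids[s]) != int(blank_id)]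
-- ===== Notes on version B (the rewrite author's own statement) =====
-- stated objective: alternative
-- what changed: Replaces A's single-pass current-run state machine (sentinel append, flush on change) with a two-stage boundary method: first collect all change-point indices into a cut list, then pair adjacent cuts into (label, start, end) intervals and keep the non-blank ones.
import Mathlib
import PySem

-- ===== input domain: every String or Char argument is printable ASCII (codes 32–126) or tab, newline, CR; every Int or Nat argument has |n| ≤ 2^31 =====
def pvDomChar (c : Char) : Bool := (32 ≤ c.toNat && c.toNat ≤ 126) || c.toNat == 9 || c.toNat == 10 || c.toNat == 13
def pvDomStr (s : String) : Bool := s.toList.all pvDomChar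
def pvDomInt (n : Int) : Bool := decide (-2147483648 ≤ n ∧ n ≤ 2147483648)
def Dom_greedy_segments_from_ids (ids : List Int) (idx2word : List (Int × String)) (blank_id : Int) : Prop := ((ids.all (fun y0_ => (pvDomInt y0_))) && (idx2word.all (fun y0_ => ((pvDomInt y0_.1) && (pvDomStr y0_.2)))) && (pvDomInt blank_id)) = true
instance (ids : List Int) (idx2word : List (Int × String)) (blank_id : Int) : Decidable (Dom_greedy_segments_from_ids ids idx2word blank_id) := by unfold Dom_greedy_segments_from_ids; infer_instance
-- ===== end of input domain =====

-- B replaces A's one-pass current-run state machine with a two-stage boundary method: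
-- first collect every change point into a cut list, then pair adjacent cuts into
-- intervals and keep the non-blank ones (objective: alternative).

-- shared helper: idx2word.get(k, "<unk>") on the association list (first match)
def pvDictGetUnk (idx2word : List (Int × String)) (k : Int) : String :=
  (((idx2word.find? (fun p => p.1 == k)).map (fun p => p.2)).getD "<unk>")

-- ===== PORT A =====
-- enumerate(ids + [None]) with Int indices; state = (segs, cur : Option Int, cur_start)
def pvEnumFrom (t : Int) : List (Option Int) → List (Int × Option Int)
  | [] => []
  | x :: xs => (t, x) :: pvEnumFrom (t + 1) xs

def pvStepA (idx2word : List (Int × String)) (blank_id : Int)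
    (s : List (String × Int × Int) × Option Int × Int) (p : Int × Option Int) :
    List (String × Int × Int) × Option Int × Int :=
  match s.2.1 with
  | none => (s.1, p.2, p.1)                 -- cur is None: cur = tok; cur_start = t; continue
  | some c =>
    if p.2 ≠ some c then                    -- tok != cur
      let segs' := if c ≠ blank_id then
          s.1 ++ [(pvDictGetUnk idx2word c, s.2.2, p.1)] else s.1
      (segs', p.2, p.1)
    else s

def greedy_segments_from_ids (ids : List Int) (idx2word : List (Int × String)) (blank_id : Int) : List (String × Int × Int) :=
  ((pvEnumFrom 0 (ids.map some ++ [none])).foldl (pvStepA idx2word blank_id) ([], none, 0)).1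

-- ===== PORT B =====
-- cuts = [0] + [i for i in range(1, n) if ids[i] != ids[i-1]] + [n]
def pvInnerCuts (ids : List Int) : List Int :=
  (PySem.List.pyRange 1 (PySem.List.len ids) 1).filter
    (fun i => PySem.List.pyGet? ids i ≠ PySem.List.pyGet? ids (i - 1))

def pvCuts (ids : List Int) : List Int :=
  0 :: (pvInnerCuts ids ++ [PySem.List.len ids])

-- idx2word.get(int(ids[s]), "<unk>"); s is always a valid index (the none arm is unreachable totalization)
def pvLabel (idx2word : List (Int × String)) (ids : List Int) (s : Int) : String :=
  match PySem.List.pyGet? ids s with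
  | some k => pvDictGetUnk idx2word k
  | none => "<unk>"

-- the comprehension over zip(cuts, cuts[1:])
def pvSegsOf (ids : List Int) (idx2word : List (Int × String)) (blank_id : Int) : List (String × Int × Int) :=
  (((pvCuts ids).zip (PySem.List.slice (pvCuts ids) (some 1) none)).filter
      (fun p => PySem.List.pyGet? ids p.1 ≠ some blank_id)).map
    (fun p => (pvLabel idx2word ids p.1, p.1, p.2))

def greedy_segments_from_ids_alt (ids : List Int) (idx2word : List (Int × String)) (blank_id : Int) : List (String × Int × Int) :=
  if ids = [] then [] else pvSegsOf ids idx2word blank_id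

-- ===== PRECONDITION & SPEC =====
def Spec_greedy_segments_from_ids (ids : List Int) (idx2word : List (Int × String)) (blank_id : Int) (out : List (String × Int × Int)) : Prop := out = greedy_segments_from_ids_alt ids idx2word blank_id
instance (ids : List Int) (idx2word : List (Int × String)) (blank_id : Int) (out : List (String × Int × Int)) : Decidable (Spec_greedy_segments_from_ids ids idx2word blank_id out) := by unfold Spec_greedy_segments_from_ids; infer_instance

-- ===== CLAIM (what is proved, stated in full; the proofs are below) =====
def Claim_equal_greedy_segments_from_ids : Prop := ∀ (ids : List Int) (idx2word : List (Int × String)) (blank_id : Int), Dom_greedy_segments_from_ids ids idx2word blank_id → Spec_greedy_segments_from_ids ids idx2word blank_id (greedy_segments_from_ids ids idx2word blank_id)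

-- ===== LEMMAS AND PROOFS =====

-- proof-only bridge: run-length recursion both ports are measured against
def pvRun (k : Int) : List Int → Nat × List Int
  | [] => (0, [])
  | x :: xs => if x = k then let r := pvRun k xs; (r.1 + 1, r.2) else (0, x :: xs)

theorem pvRun_len_le (k : Int) (l : List Int) : (pvRun k l).2.length ≤ l.length := by
  induction l with
  | nil => simp [pvRun]
  | cons x xs ih => by_cases h : x = k <;> simp [pvRun, h] <;> omega

def pvGroups (idx2word : List (Int × String)) (blank_id : Int) : List Int → Int → List (String × Int × Int)
  | [], _ => []
  | k :: rest, pos =>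
    let r := pvRun k rest
    let n : Int := (r.1 : Int) + 1
    (if k ≠ blank_id then [(pvDictGetUnk idx2word k, pos, pos + n)] else []) ++
      pvGroups idx2word blank_id r.2 (pos + n)
termination_by l _ => l.length
decreasing_by simpa using Nat.lt_succ_of_le (pvRun_len_le _ _)

-- A's fold from state (segs, some c, s): flush c's continuing run, then B-shape groups
theorem pvMain (idx2word : List (Int × String)) (blank_id : Int) :
    ∀ (l : List Int) (c s t : Int) (segs : List (String × Int × Int)),
    ((pvEnumFrom t (l.map some ++ [none])).foldl (pvStepA idx2word blank_id) (segs, some c, s)).1 =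
      segs ++ (if c ≠ blank_id then
          [(pvDictGetUnk idx2word c, s, t + ((pvRun c l).1 : Int))] else []) ++
        pvGroups idx2word blank_id (pvRun c l).2 (t + ((pvRun c l).1 : Int)) := by
  intro l
  induction l with
  | nil =>
    intro c s t segs
    simp [pvEnumFrom, pvRun, pvStepA, pvGroups]
    split_ifs <;> simp
  | cons x xs ih =>
    intro c s t segs
    by_cases hx : x = c
    · subst hx
      have : pvEnumFrom t ((x :: xs).map some ++ [none]) =
          (t, some x) :: pvEnumFrom (t + 1) (xs.map some ++ [none]) := by
        simp [pvEnumFrom]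
      rw [this]
      simp only [List.foldl_cons]
      have hstep : pvStepA idx2word blank_id (segs, some x, s) (t, some x) = (segs, some x, s) := by
        simp [pvStepA]
      rw [hstep, ih x s (t + 1) segs]
      simp only [pvRun]
      have harith : t + 1 + ((pvRun x xs).1 : Int) = t + (((pvRun x xs).1 + 1 : Nat) : Int) := by
        push_cast; ring
      rw [harith]
      simp
    · have : pvEnumFrom t ((x :: xs).map some ++ [none]) =
          (t, some x) :: pvEnumFrom (t + 1) (xs.map some ++ [none]) := by
        simp [pvEnumFrom]
      rw [this]
      simp only [List.foldl_cons]
      have hne : (some x ≠ some c) := by simpa using hx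
      have hstep : pvStepA idx2word blank_id (segs, some c, s) (t, some x) =
          ((if c ≠ blank_id then segs ++ [(pvDictGetUnk idx2word c, s, t)] else segs), some x, t) := by
        simp [pvStepA, hne]
      rw [hstep, ih x t (t + 1) _]
      have hrun : pvRun c (x :: xs) = (0, x :: xs) := by simp [pvRun, hx]
      rw [hrun]
      have hg : pvGroups idx2word blank_id (x :: xs) (t + ((0 : Nat) : Int)) =
          (if x ≠ blank_id then
            [(pvDictGetUnk idx2word x, t, t + (((pvRun x xs).1 : Int) + 1))] else []) ++
          pvGroups idx2word blank_id (pvRun x xs).2 (t + (((pvRun x xs).1 : Int) + 1)) := by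
        simp [pvGroups]
      rw [hg]
      have harith : t + 1 + ((pvRun x xs).1 : Int) = t + (((pvRun x xs).1 : Int) + 1) := by ring
      rw [harith]
      by_cases hc : c = blank_id <;> by_cases hxb : x = blank_id <;>
        simp [hc, hxb, List.append_assoc]

-- A equals pvGroups at position 0
theorem pvA_eq_groups (ids : List Int) (idx2word : List (Int × String)) (blank_id : Int) :
    greedy_segments_from_ids ids idx2word blank_id = pvGroups idx2word blank_id ids 0 := by
  unfold greedy_segments_from_ids
  cases ids with
  | nil => simp [pvEnumFrom, pvStepA, pvGroups]
  | cons x xs =>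
    have : pvEnumFrom 0 ((x :: xs).map some ++ [none]) =
        (0, some x) :: pvEnumFrom 1 (xs.map some ++ [none]) := by
      simp [pvEnumFrom]
    rw [this]
    simp only [List.foldl_cons]
    have hstep : pvStepA idx2word blank_id ([], none, 0) (0, some x) = ([], some x, 0) := by
      simp [pvStepA]
    rw [hstep, pvMain idx2word blank_id xs x 0 1 []]
    have hg : pvGroups idx2word blank_id (x :: xs) 0 =
        (if x ≠ blank_id then
          [(pvDictGetUnk idx2word x, 0, 0 + (((pvRun x xs).1 : Int) + 1))] else []) ++
        pvGroups idx2word blank_id (pvRun x xs).2 (0 + (((pvRun x xs).1 : Int) + 1)) := by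
      simp [pvGroups]
    rw [hg]
    have harith : (1 : Int) + ((pvRun x xs).1 : Int) = 0 + (((pvRun x xs).1 : Int) + 1) := by ring
    rw [harith]
    simp

-- pvRun decomposes a list into a maximal head run and a rest with a different head
theorem pvRun_spec (x : Int) (xs : List Int) :
    x :: xs = List.replicate ((pvRun x xs).1 + 1) x ++ (pvRun x xs).2 ∧
      (pvRun x xs).2.head? ≠ some x := by
  induction xs with
  | nil => simp [pvRun]
  | cons y t ih =>
    by_cases h : y = x
    · subst h
      obtain ⟨h1, h2⟩ := ih
      refine ⟨?_, by simpa [pvRun] using h2⟩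
      simp only [pvRun, if_pos rfl]
      calc y :: y :: t = y :: (List.replicate ((pvRun y t).1 + 1) y ++ (pvRun y t).2) := by rw [← h1]
        _ = List.replicate ((pvRun y t).1 + 1 + 1) y ++ (pvRun y t).2 := by
              simp [List.replicate_succ]
    · constructor
      · simp [pvRun, h, List.replicate]
      · simp only [pvRun, if_neg h, List.head?_cons]
        exact fun hxy => h (Option.some.inj hxy)

-- shifting the start position shifts every segment of pvGroups
theorem pvGroups_shift (idx2word : List (Int × String)) (blank_id : Int) :
    ∀ (fuel : Nat) (l : List Int), l.length ≤ fuel → ∀ (p d : Int),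
    pvGroups idx2word blank_id l (p + d) =
      (pvGroups idx2word blank_id l p).map (fun s => (s.1, s.2.1 + d, s.2.2 + d)) := by
  intro fuel
  induction fuel with
  | zero =>
    intro l hl p d
    have : l = [] := List.eq_nil_of_length_eq_zero (Nat.le_zero.mp hl)
    subst this; simp [pvGroups]
  | succ n ih =>
    intro l hl p d
    cases l with
    | nil => simp [pvGroups]
    | cons k rest =>
      have hlen : (pvRun k rest).2.length ≤ n := by
        have := pvRun_len_le k rest
        simp at hl; omega
      simp only [pvGroups]
      rw [show p + d + (((pvRun k rest).1 : Int) + 1) =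
            (p + (((pvRun k rest).1 : Int) + 1)) + d by ring,
          ih _ hlen]
      by_cases hk : k = blank_id <;> simp [hk]

-- elements of the cut list are nonnegative
theorem pvCuts_nonneg (ids : List Int) : ∀ c ∈ pvCuts ids, 0 ≤ c := by
  intro c hc
  simp only [pvCuts, List.mem_cons, List.mem_append, List.mem_singleton] at hc
  rcases hc with h | h | h
  · omega
  · have := List.mem_filter.mp h |>.1
    have := (PySem.List.mem_pyRange_one.mp this).1
    omega
  · rcases h with h | h
    · subst h; simp [PySem.List.len_eq]
    · simp at h

-- indexing into (replicate k x ++ rest)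
theorem pvGetRepl_left (k j : Nat) (x : Int) (rest : List Int) (hj : j < k) :
    PySem.List.pyGet? (List.replicate k x ++ rest) ((j : Nat) : Int) = some x := by
  rw [PySem.List.pyGet?_natCast, List.getElem?_append_left (by simpa using hj)]
  simp [List.getElem?_replicate, hj]

theorem pvGetRepl_right (k j : Nat) (x : Int) (rest : List Int) :
    PySem.List.pyGet? (List.replicate k x ++ rest) (((k + j : Nat)) : Int) = rest[j]? := by
  rw [PySem.List.pyGet?_natCast, List.getElem?_append_right (by simp)]
  simp

-- inner cuts of (replicate k x ++ rest): one cut at k (if rest nonempty) then rest's cuts shifted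
theorem pvInnerCuts_split (k : Nat) (hk : 1 ≤ k) (x : Int) (rest : List Int)
    (hr : rest.head? ≠ some x) :
    pvInnerCuts (List.replicate k x ++ rest) =
      (if rest.isEmpty then [] else [(k : Int)]) ++ (pvInnerCuts rest).map (· + (k : Int)) := by
  have hgetL : ∀ j : Nat, j < k → PySem.List.pyGet? (List.replicate k x ++ rest) ((j : Nat) : Int) = some x :=
    fun j hj => pvGetRepl_left k j x rest hj
  have hgetR : ∀ j : Nat, PySem.List.pyGet? (List.replicate k x ++ rest) (((k + j : Nat) : Nat) : Int) = rest[j]? :=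
    fun j => pvGetRepl_right k j x rest
  have hlen : PySem.List.len (List.replicate k x ++ rest) = ((k + rest.length : Nat) : Int) := by
    simp [PySem.List.len_eq]
  unfold pvInnerCuts
  rw [hlen, PySem.List.pyRange_one]
  have hcnt : (((k + rest.length : Nat) : Int) - 1).toNat = (k - 1) + rest.length := by omega
  rw [hcnt, List.range_add, List.map_append, List.filter_append, List.map_map]
  have h1 : ((List.range (k - 1)).map (fun j : Nat => (1 : Int) + (j : Int))).filter
      (fun i => PySem.List.pyGet? (List.replicate k x ++ rest) i ≠
        PySem.List.pyGet? (List.replicate k x ++ rest) (i - 1)) = [] := by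
    rw [List.filter_eq_nil_iff]
    intro i hi
    obtain ⟨j, hj, rfl⟩ := List.mem_map.mp hi
    have hj' : j < k - 1 := List.mem_range.mp hj
    have e1 : (1 : Int) + (j : Int) = ((j + 1 : Nat) : Int) := by push_cast; ring
    have e2 : (1 : Int) + (j : Int) - 1 = ((j : Nat) : Int) := by push_cast; ring
    rw [e2, e1, hgetL (j + 1) (by omega), hgetL j (by omega)]
    simp
  rw [h1, List.nil_append]
  rcases heq : rest with _ | ⟨y, t⟩
  · subst heq
    simp [pvInnerCuts, PySem.List.len_eq, PySem.List.pyRange_one]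
  · subst heq
    have hy : y ≠ x := by simpa using hr
    have hcomp : (fun j : Nat => (1 : Int) + ((k - 1 + j : Nat) : Int)) = (fun j : Nat => (k : Int) + (j : Int)) := by
      funext j; omega
    simp only [Function.comp_def]
    rw [show (List.range (y :: t).length) = List.range (t.length + 1) by simp,
        List.range_succ_eq_map, List.map_cons, List.map_map]
    simp only [Function.comp_def, Nat.succ_eq_add_one]
    have hhead : (1 : Int) + ((k - 1 + 0 : Nat) : Int) = ((k : Nat) : Int) := by omega
    rw [hhead]
    have hPk : (PySem.List.pyGet? (List.replicate k x ++ y :: t) ((k : Nat) : Int) ≠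
        PySem.List.pyGet? (List.replicate k x ++ y :: t) (((k : Nat) : Int) - 1)) := by
      have e0 : ((k : Nat) : Int) = (((k + 0 : Nat) : Nat) : Int) := by omega
      have e1 : ((k : Nat) : Int) - 1 = (((k - 1 : Nat) : Nat) : Int) := by omega
      rw [e1, e0, hgetR 0, hgetL (k - 1) (by omega)]
      simpa using hy
    rw [List.filter_cons_of_pos (by simpa using hPk)]
    -- tail: indices (k+1)+j vs rest's inner cuts shifted
    have htail : ((List.range t.length).map (fun j : Nat => (1 : Int) + ((k - 1 + (j + 1) : Nat) : Int))).filter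
        (fun i => PySem.List.pyGet? (List.replicate k x ++ y :: t) i ≠
          PySem.List.pyGet? (List.replicate k x ++ y :: t) (i - 1)) =
        (pvInnerCuts (y :: t)).map (· + (k : Int)) := by
      unfold pvInnerCuts
      rw [PySem.List.len_eq, PySem.List.pyRange_one]
      have hc2 : (((y :: t).length : Int) - 1).toNat = t.length := by simp
      rw [hc2, List.filter_map, List.filter_map, List.map_map]
      congr 1
      · funext j
        simp only [Function.comp_def]
        omega
      · apply List.filter_congr
        intro j hj
        have e1 : (1 : Int) + ((k - 1 + (j + 1) : Nat) : Int) = (((k + (j + 1) : Nat) : Nat) : Int) := by omega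
        have e2 : (1 : Int) + ((k - 1 + (j + 1) : Nat) : Int) - 1 = (((k + j : Nat) : Nat) : Int) := by omega
        have f1 : (1 : Int) + ((j : Nat) : Int) = (((j + 1 : Nat) : Nat) : Int) := by omega
        have f2 : (1 : Int) + ((j : Nat) : Int) - 1 = ((j : Nat) : Int) := by omega
        simp only [Function.comp_def]
        rw [e2, e1, f2, f1, hgetR (j + 1), hgetR j, PySem.List.pyGet?_natCast, PySem.List.pyGet?_natCast]
    rw [htail]
    simp [pvInnerCuts]

-- the segment comprehension of (replicate k x ++ rest)
theorem pvSegsOf_split (k : Nat) (hk : 1 ≤ k) (x : Int) (rest : List Int)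
    (hr : rest.head? ≠ some x) (idx2word : List (Int × String)) (blank_id : Int) :
    pvSegsOf (List.replicate k x ++ rest) idx2word blank_id =
      (if x ≠ blank_id then [(pvDictGetUnk idx2word x, 0, (k : Int))] else []) ++
        (if rest.isEmpty then [] else
          (pvSegsOf rest idx2word blank_id).map (fun s => (s.1, s.2.1 + (k : Int), s.2.2 + (k : Int)))) := by
  have hlen : PySem.List.len (List.replicate k x ++ rest) = ((k + rest.length : Nat) : Int) := by
    simp [PySem.List.len_eq]
  have hget0 : PySem.List.pyGet? (List.replicate k x ++ rest) 0 = some x := by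
    simpa using pvGetRepl_left k 0 x rest (by omega)
  rcases heq : rest with _ | ⟨y, t⟩
  · subst heq
    have hic : pvInnerCuts (List.replicate k x ++ []) = [] := by
      simpa using pvInnerCuts_split k hk x [] (by simp)
    unfold pvSegsOf pvCuts
    rw [PySem.List.slice_from_one, hic, hlen]
    simp only [List.tail_cons, List.nil_append, List.zip_cons_cons, List.zip_nil_right]
    rw [List.append_nil] at hget0
    by_cases hx : x = blank_id
    · subst hx; simp [hget0, pvLabel, List.filter]
    · simp [hx, hget0, pvLabel, List.filter]
  · subst heq
    have hic := pvInnerCuts_split k hk x (y :: t) hr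
    have hcuts : pvCuts (List.replicate k x ++ y :: t) =
        0 :: (pvCuts (y :: t)).map (· + (k : Int)) := by
      unfold pvCuts
      rw [hic, hlen]
      simp [PySem.List.len_eq, List.map_append]
      omega
    unfold pvSegsOf
    rw [PySem.List.slice_from_one, hcuts]
    simp only [List.tail_cons]
    have hcr0 : pvCuts (y :: t) = 0 :: (pvInnerCuts (y :: t) ++ [PySem.List.len (y :: t)]) := rfl
    set crt := pvInnerCuts (y :: t) ++ [PySem.List.len (y :: t)] with hcrt
    rw [hcr0]
    simp only [List.map_cons, List.zip_cons_cons]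
    -- head pair (0, 0 + k)
    have hzip : ((0 + (k : Int)) :: crt.map (· + (k : Int))).zip (crt.map (· + (k : Int))) =
        ((0 :: crt).zip crt).map (Prod.map (· + (k : Int)) (· + (k : Int))) := by
      rw [show ((0 + (k : Int)) :: crt.map (· + (k : Int))) = (0 :: crt).map (· + (k : Int)) by simp,
          List.zip_map]
    rw [hzip]
    have hmem1 : ∀ p ∈ (0 :: crt).zip crt, (0 : Int) ≤ p.1 := by
      intro p hp
      have := (List.of_mem_zip hp).1
      exact pvCuts_nonneg (y :: t) p.1 (by rw [hcr0]; exact this)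
    have hgets : ∀ p ∈ (0 :: crt).zip crt,
        PySem.List.pyGet? (List.replicate k x ++ y :: t) (p.1 + (k : Int)) =
          PySem.List.pyGet? (y :: t) p.1 := by
      intro p hp
      have h0 := hmem1 p hp
      have e : p.1 + (k : Int) = ((k + p.1.toNat : Nat) : Int) := by omega
      rw [e, pvGetRepl_right]
      exact (PySem.List.pyGet?_of_nonneg _ h0).symm
    -- filter the head pair, then push filter/map through the shifted tail
    have hfc : ∀ b : Int, List.filter ((fun p : Int × Int =>
          decide (PySem.List.pyGet? (List.replicate k x ++ y :: t) p.1 ≠ some b)) ∘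
            Prod.map (· + (k : Int)) (· + (k : Int))) ((0 :: crt).zip crt) =
        List.filter (fun p : Int × Int =>
          decide (PySem.List.pyGet? (y :: t) p.1 ≠ some b)) ((0 :: crt).zip crt) := by
      intro b
      apply List.filter_congr
      intro p hp
      simp only [Function.comp_def, Prod.map_fst]
      simp only [hgets p hp]
    have hlast : ∀ p ∈ List.filter (fun p : Int × Int =>
          decide (PySem.List.pyGet? (y :: t) p.1 ≠ some blank_id)) ((0 :: crt).zip crt),
        ((fun p : Int × Int => (pvLabel idx2word (List.replicate k x ++ y :: t) p.1, p.1, p.2)) ∘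
            Prod.map (· + (k : Int)) (· + (k : Int))) p =
          (fun s : String × Int × Int => (s.1, s.2.1 + (k : Int), s.2.2 + (k : Int)))
            ((fun p : Int × Int => (pvLabel idx2word (y :: t) p.1, p.1, p.2)) p) := by
      intro p hp
      have hp' := (List.mem_filter.mp hp).1
      simp only [Function.comp_def, Prod.map_fst, Prod.map_snd]
      unfold pvLabel
      rw [hgets p hp']
    by_cases hx : x = blank_id
    · subst hx
      rw [List.filter_cons_of_neg (by simp [hget0])]
      rw [List.filter_map, List.map_map, hfc]
      rw [if_neg (by simp), List.nil_append, if_neg (by simp)]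
      rw [PySem.List.slice_from_one]
      simp only [List.tail_cons, List.map_map]
      exact List.map_congr_left hlast
    · rw [List.filter_cons_of_pos (by simp [hget0, hx])]
      rw [List.map_cons, List.filter_map, List.map_map, hfc]
      rw [if_pos hx, if_neg (by simp)]
      rw [PySem.List.slice_from_one]
      simp only [List.tail_cons, List.map_map, List.singleton_append]
      congr 1
      · simp [pvLabel, hget0]
      · exact List.map_congr_left hlast

-- B equals pvGroups at position 0
theorem pvB_eq_groups (idx2word : List (Int × String)) (blank_id : Int) :
    ∀ (fuel : Nat) (ids : List Int), ids.length ≤ fuel →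
    greedy_segments_from_ids_alt ids idx2word blank_id = pvGroups idx2word blank_id ids 0 := by
  intro fuel
  induction fuel with
  | zero =>
    intro ids h
    have : ids = [] := List.eq_nil_of_length_eq_zero (Nat.le_zero.mp h)
    subst this
    simp [greedy_segments_from_ids_alt, pvGroups]
  | succ n ih =>
    intro ids h
    cases ids with
    | nil => simp [greedy_segments_from_ids_alt, pvGroups]
    | cons x xs =>
      obtain ⟨hdecomp, hhead⟩ := pvRun_spec x xs
      have hrl : (pvRun x xs).2.length ≤ n := by
        have := pvRun_len_le x xs; simp at h; omega
      have halt : greedy_segments_from_ids_alt (x :: xs) idx2word blank_id =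
          pvSegsOf (x :: xs) idx2word blank_id := by
        simp [greedy_segments_from_ids_alt]
      rw [halt]
      have hG : pvGroups idx2word blank_id (x :: xs) 0 =
          (if x ≠ blank_id then
            [(pvDictGetUnk idx2word x, 0, 0 + (((pvRun x xs).1 : Int) + 1))] else []) ++
            pvGroups idx2word blank_id (pvRun x xs).2 (0 + (((pvRun x xs).1 : Int) + 1)) := by
        simp [pvGroups]
      rw [hG, hdecomp]
      rw [pvSegsOf_split ((pvRun x xs).1 + 1) (by omega) x (pvRun x xs).2 hhead]
      by_cases hre : (pvRun x xs).2 = []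
      · rw [hre]
        simp [pvGroups]
      · rw [show (pvRun x xs).2.isEmpty = false by simp [hre]]
        simp only [Bool.false_eq_true, if_false]
        have halt2 : pvSegsOf (pvRun x xs).2 idx2word blank_id =
            greedy_segments_from_ids_alt (pvRun x xs).2 idx2word blank_id := by
          simp [greedy_segments_from_ids_alt, hre]
        rw [halt2, ih _ hrl]
        rw [pvGroups_shift idx2word blank_id n _ hrl 0 (((pvRun x xs).1 : Int) + 1)]
        push_cast
        rw [Int.zero_add]

-- ===== VERDICT (by name: the statement is the Claim_ definition above) =====
theorem greedy_segments_from_ids_spec : Claim_equal_greedy_segments_from_ids := by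
  intro ids idx2word blank_id _
  unfold Spec_greedy_segments_from_ids
  rw [pvA_eq_groups, pvB_eq_groups idx2word blank_id ids.length ids le_rfl]
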